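-- pv_equiv track=rewrite | github.com/AlifSrSE/ProblemSolves | 2050E-threeStrings.py | solve
-- ===== SOURCE A (Python) =====
-- def solve(a, b, c):
--     n, m = len(a), len(b)
--     dp = [[0] * (m + 1) for _ in range(n + 1)]
--
--     for i in range(n + 1):
--         for j in range(m + 1):
--             if i == 0 and j == 0:
--                 continue
--             cost_a = float('inf')
--             cost_b = float('inf')
--
--             if i > 0:
--                 cost_a = dp[i - 1][j] + (0 if a[i - 1] == c[i + j - 1] else 1)
--             if j > 0:
--                 cost_b = dp[i][j - 1] + (0 if b[j - 1] == c[i + j - 1] else 1)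
--
--             dp[i][j] = min(cost_a, cost_b)
--
--     return dp[n][m]
-- ===== SOURCE B (Python) =====
-- def solve(a, b, c):
--     n, m = len(a), len(b)
--     prev = [0]
--     for s in range(1, n + m + 1):
--         ch = c[s - 1]
--         lo = max(0, s - m)
--         hi = min(n, s)
--         plo = max(0, s - 1 - m)
--         cur = []
--         for i in range(lo, hi + 1):
--             opts = []
--             if i > 0:
--                 opts.append(prev[i - 1 - plo] + (1 if a[i - 1] != ch else 0))
--             if i < s:
--                 opts.append(prev[i - plo] + (1 if b[s - i - 1] != ch else 0))
--             cur.append(min(opts))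
--         prev = cur
--     return prev[-1]
-- ===== Notes on version B (the rewrite author's own statement) =====
-- stated objective: alternative
-- what changed: B replaces A's full (n+1)x(m+1) table filled row by row with an anti-diagonal sweep that keeps only one diagonal of the DP in a rolling 1-D list (the character of c is fixed per diagonal), reducing memory from O(nm) to O(min(n,m)).
import Mathlib
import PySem

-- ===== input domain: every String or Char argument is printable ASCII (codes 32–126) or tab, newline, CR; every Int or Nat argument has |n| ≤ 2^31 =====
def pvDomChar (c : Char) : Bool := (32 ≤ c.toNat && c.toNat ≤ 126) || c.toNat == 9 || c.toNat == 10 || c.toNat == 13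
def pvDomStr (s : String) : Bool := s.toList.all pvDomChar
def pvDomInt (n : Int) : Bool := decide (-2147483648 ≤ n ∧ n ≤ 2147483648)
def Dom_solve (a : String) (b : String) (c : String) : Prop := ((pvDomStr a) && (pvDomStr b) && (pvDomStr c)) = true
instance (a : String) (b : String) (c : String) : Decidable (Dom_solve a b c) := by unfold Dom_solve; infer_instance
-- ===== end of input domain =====

-- B re-implements A's row-by-row (n+1)×(m+1) DP table as an anti-diagonal sweep keeping a
-- single rolling 1-D list per diagonal (same O(nm) time, O(min(n,m)) memory); return values
-- are proved equal on Pre_ (A raises IndexError when len(c) < len(a)+len(b)).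

-- ===== PORT A =====
-- Python's float('inf') sentinel is modelled as `none`; min(cost_a, cost_b).  The none/none
-- case is unreachable (the (0,0) iteration is skipped by `continue`).
def pyMinInf (x y : Option Int) : Int :=
  match x, y with
  | some x, some y => min x y
  | some x, none => x
  | none, some y => y
  | none, none => 0

-- loop body of A's inner `for j in range(m+1)` (named so the fold can cite it)
def stepA (a b c : String) (i : Int) (dp : List (List Int)) (j : Int) : List (List Int) :=
  if i == 0 && j == 0 then dp
  else
    let costA : Option Int :=
      if i > 0 then
        some (PySem.List.pyGetD (PySem.List.pyGetD dp (i-1) []) j 0 +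
          (if PySem.Str.pyGet? a (i-1) == PySem.Str.pyGet? c (i+j-1) then 0 else 1))
      else none
    let costB : Option Int :=
      if j > 0 then
        some (PySem.List.pyGetD (PySem.List.pyGetD dp i []) (j-1) 0 +
          (if PySem.Str.pyGet? b (j-1) == PySem.Str.pyGet? c (i+j-1) then 0 else 1))
      else none
    PySem.List.pySetD dp i (PySem.List.pySetD (PySem.List.pyGetD dp i []) j (pyMinInf costA costB))

-- A's outer loop body: one full row i
def rowA (a b c : String) (m : Int) (dp : List (List Int)) (i : Int) : List (List Int) :=
  (PySem.List.pyRange 0 (m+1) 1).foldl (stepA a b c i) dp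

def solve (a : String) (b : String) (c : String) : Int :=
  let n : Int := PySem.Str.len a
  let m : Int := PySem.Str.len b
  let dp0 : List (List Int) :=
    (PySem.List.pyRange 0 (n+1) 1).map (fun _ => List.replicate (m+1).toNat (0:Int))
  let dp := (PySem.List.pyRange 0 (n+1) 1).foldl (rowA a b c m) dp0
  PySem.List.pyGetD (PySem.List.pyGetD dp n []) m 0

-- ===== PORT B =====
-- loop body of B's inner `for i in range(lo, hi+1)` (cur.append(min(opts)))
def stepB (a b : String) (ch : Option Char) (prev : List Int) (s plo : Int)
    (cur : List Int) (i : Int) : List Int :=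
  let opts : List Int :=
    (if i > 0 then
        [PySem.List.pyGetD prev (i-1-plo) 0 + (if PySem.Str.pyGet? a (i-1) != ch then 1 else 0)]
      else []) ++
    (if i < s then
        [PySem.List.pyGetD prev (i-plo) 0 + (if PySem.Str.pyGet? b (s-i-1) != ch then 1 else 0)]
      else [])
  cur ++ [(PySem.List.min? opts (fun x => x)).getD 0]

-- B's outer loop body: one anti-diagonal s (i + j = s), built left to right
def diagB (a b c : String) (n m : Int) (prev : List Int) (s : Int) : List Int :=
  let ch := PySem.Str.pyGet? c (s-1)
  let lo := max 0 (s - m)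
  let hi := min n s
  let plo := max 0 (s - 1 - m)
  (PySem.List.pyRange lo (hi+1) 1).foldl (stepB a b ch prev s plo) []

def solve_alt (a : String) (b : String) (c : String) : Int :=
  let n : Int := PySem.Str.len a
  let m : Int := PySem.Str.len b
  let prev := (PySem.List.pyRange 1 (n+m+1) 1).foldl (diagB a b c n m) [0]
  PySem.List.pyGetD prev (-1) 0

-- ===== PRECONDITION & SPEC =====
-- Pre_: both Pythons raise IndexError (c[i+j-1] / c[s-1] out of range) exactly when
-- len(c) < len(a) + len(b); no other input raises.
def Pre_solve (a : String) (b : String) (c : String) : Prop :=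
  PySem.Str.len a + PySem.Str.len b ≤ PySem.Str.len c
instance (a : String) (b : String) (c : String) : Decidable (Pre_solve a b c) := by
  unfold Pre_solve; infer_instance
def pvWitness_solve : String × String × String := ("ab", "xy", "axby")

def Spec_solve (a : String) (b : String) (c : String) (out : Int) : Prop := out = solve_alt a b c
instance (a : String) (b : String) (c : String) (out : Int) : Decidable (Spec_solve a b c out) := by
  unfold Spec_solve; infer_instance

-- ===== CLAIM (what is proved, stated in full; the proofs are below) =====
def Claim_equal_solve : Prop := ∀ (a : String) (b : String) (c : String),
  Dom_solve a b c → Pre_solve a b c → Spec_solve a b c (solve a b c)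

-- ===== LEMMAS AND PROOFS =====

-- the common DP value: bestM a b c i j = min mismatches interleaving a[:i], b[:j] into c[:i+j]
def mis (x y : Option Char) : Int := if x == y then 0 else 1

def bestM (a b c : String) : Nat → Nat → Int
  | 0, 0 => 0
  | i+1, 0 => bestM a b c i 0 + mis (a.toList[i]?) (c.toList[i]?)
  | 0, j+1 => bestM a b c 0 j + mis (b.toList[j]?) (c.toList[j]?)
  | i+1, j+1 => min (bestM a b c i (j+1) + mis (a.toList[i]?) (c.toList[i+j+1]?))
                    (bestM a b c (i+1) j + mis (b.toList[j]?) (c.toList[i+j+1]?))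

theorem misNe (x y : Option Char) : (if x != y then (1:Int) else 0) = mis x y := by
  cases h : x == y <;> simp [mis, bne, h]

theorem bestM_eq (a b c : String) (i j : Nat) (h : ¬(i = 0 ∧ j = 0)) :
    bestM a b c i j = pyMinInf
      (if 0 < i then some (bestM a b c (i-1) j + mis (a.toList[i-1]?) (c.toList[i+j-1]?)) else none)
      (if 0 < j then some (bestM a b c i (j-1) + mis (b.toList[j-1]?) (c.toList[i+j-1]?)) else none) := by
  match i, j with
  | 0, 0 => exact absurd ⟨rfl, rfl⟩ h
  | i+1, 0 => simp [bestM, pyMinInf]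
  | 0, j+1 => simp [bestM, pyMinInf]
  | i+1, j+1 =>
      have h1 : i + 1 + (j + 1) - 1 = i + j + 1 := by omega
      simp [bestM, pyMinInf, h1]

-- general list-indexing helpers used by both table proofs
theorem getD_append_length {α : Type} (xs ys : List α) (y : α) (d : α) :
    (xs ++ y :: ys).getD xs.length d = y := by
  rw [List.getD_eq_getElem?_getD, List.getElem?_append_right (le_refl _)]
  simp

theorem getD_append_lt {α : Type} (xs ys : List α) (k : Nat) (d : α) (h : k < xs.length) :
    (xs ++ ys).getD k d = xs.getD k d := by
  rw [List.getD_eq_getElem?_getD, List.getElem?_append_left h, ← List.getD_eq_getElem?_getD]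

theorem getD_map_range' {α : Type} (f : Nat → α) (n k : Nat) (d : α) (h : k < n) :
    ((List.range n).map f).getD k d = f k := by
  rw [List.getD_eq_getElem?_getD]
  simp [h]

theorem set_append_cons {α : Type} (xs ys : List α) (y v : α) :
    (xs ++ y :: ys).set xs.length v = xs ++ v :: ys := by
  rw [List.set_append]
  simp

-- ---- A side: the partial table after A has processed rows < i fully and entries < j of row i
def rowP (a b c : String) (m i j : Nat) : List Int :=
  (List.range j).map (fun q => bestM a b c i q) ++ List.replicate (m+1-j) 0

def tabA (a b c : String) (n m i j : Nat) : List (List Int) :=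
  (List.range i).map (fun p => rowP a b c m p (m+1)) ++
    rowP a b c m i j :: List.replicate (n-i) (List.replicate (m+1) (0:Int))

theorem getRow_self (a b c : String) (n m i j : Nat) :
    (tabA a b c n m i j).getD i [] = rowP a b c m i j := by
  unfold tabA
  have h2 : ((List.range i).map (fun p => rowP a b c m p (m+1))).length = i := by simp
  have h := getD_append_length ((List.range i).map (fun p => rowP a b c m p (m+1)))
    (List.replicate (n-i) (List.replicate (m+1) (0:Int))) (rowP a b c m i j) ([] : List Int)
  rw [h2] at h
  exact h

theorem getRow_lt (a b c : String) (n m i j p : Nat) (hp : p < i) :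
    (tabA a b c n m i j).getD p [] = rowP a b c m p (m+1) := by
  unfold tabA
  rw [getD_append_lt _ _ _ _ (by simp; omega)]
  exact getD_map_range' _ _ _ _ (by omega)

theorem rowP_get (a b c : String) (m i j q : Nat) (d : Int) (hq : q < j) :
    (rowP a b c m i j).getD q d = bestM a b c i q := by
  unfold rowP
  rw [getD_append_lt _ _ _ _ (by simp; omega)]
  exact getD_map_range' _ _ _ _ (by omega)

theorem rowP_set (a b c : String) (m i j : Nat) (hj : j ≤ m) :
    (rowP a b c m i j).set j (bestM a b c i j) = rowP a b c m i (j+1) := by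
  unfold rowP
  rw [show m + 1 - j = (m - j) + 1 from by omega, List.replicate_succ]
  have h2 := set_append_cons ((List.range j).map (fun q => bestM a b c i q))
    (List.replicate (m-j) (0:Int)) 0 (bestM a b c i j)
  have h3 : ((List.range j).map (fun q => bestM a b c i q)).length = j := by simp
  rw [h3] at h2
  rw [h2, show m + 1 - (j+1) = m - j from by omega, List.range_succ]
  simp

theorem tabA_set (a b c : String) (n m i j j' : Nat) :
    (tabA a b c n m i j).set i (rowP a b c m i j') = tabA a b c n m i j' := by
  unfold tabA
  have h2 := set_append_cons ((List.range i).map (fun p => rowP a b c m p (m+1)))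
    (List.replicate (n-i) (List.replicate (m+1) (0:Int))) (rowP a b c m i j) (rowP a b c m i j')
  have h3 : ((List.range i).map (fun p => rowP a b c m p (m+1))).length = i := by simp
  rw [h3] at h2
  exact h2

theorem stepA_tab (a b c : String) (n m i j : Nat) (hi : i ≤ n) (hj : j ≤ m) :
    stepA a b c (i:Int) (tabA a b c n m i j) (j:Int) = tabA a b c n m i (j+1) := by
  by_cases h0 : i = 0 ∧ j = 0
  · obtain ⟨h1, h2⟩ := h0
    subst h1; subst h2
    have hz : bestM a b c 0 0 = 0 := by simp [bestM]
    simp [stepA, tabA, rowP, List.range_succ, List.replicate_succ, hz]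
  · have hcond : (((i:Int) == 0) && ((j:Int) == 0)) = false := by
      rcases Nat.eq_zero_or_pos i with h | h
      · rcases Nat.eq_zero_or_pos j with h' | h'
        · exact absurd ⟨h, h'⟩ h0
        · have hb : ((j:Int) == 0) = false := by simp; omega
          simp [hb]
      · have hb : ((i:Int) == 0) = false := by simp; omega
        simp [hb]
    unfold stepA
    simp only [hcond, Bool.false_eq_true, if_false]
    have hbm := bestM_eq a b c i j h0
    by_cases hip : 0 < i <;> by_cases hjp : 0 < j
    · -- both i > 0 and j > 0
      rw [if_pos (show (i:Int) > 0 from by omega), if_pos (show (j:Int) > 0 from by omega)]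
      rw [show ((i:Int) - 1) = (((i-1:Nat)):Int) from by omega,
          show ((i:Int) + (j:Int) - 1) = (((i+j-1:Nat)):Int) from by omega,
          show ((j:Int) - 1) = (((j-1:Nat)):Int) from by omega]
      simp only [PySem.List.pyGetD_natCast, PySem.Str.pyGet?_natCast, PySem.List.pySetD_natCast]
      rw [getRow_lt a b c n m i j (i-1) (by omega), getRow_self a b c n m i j]
      rw [rowP_get a b c m (i-1) (m+1) j _ (by omega), rowP_get a b c m i j (j-1) _ (by omega)]
      rw [if_pos hip, if_pos hjp] at hbm
      simp only [mis] at hbm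
      rw [← hbm, rowP_set a b c m i j hj, tabA_set]
    · -- i > 0, j = 0
      rw [if_pos (show (i:Int) > 0 from by omega), if_neg (show ¬((j:Int) > 0) from by omega)]
      rw [show ((i:Int) - 1) = (((i-1:Nat)):Int) from by omega,
          show ((i:Int) + (j:Int) - 1) = (((i+j-1:Nat)):Int) from by omega]
      simp only [PySem.List.pyGetD_natCast, PySem.Str.pyGet?_natCast, PySem.List.pySetD_natCast]
      rw [getRow_lt a b c n m i j (i-1) (by omega), getRow_self a b c n m i j]
      rw [rowP_get a b c m (i-1) (m+1) j _ (by omega)]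
      rw [if_pos hip, if_neg hjp] at hbm
      simp only [mis, pyMinInf] at hbm
      simp only [pyMinInf]
      rw [← hbm, rowP_set a b c m i j hj, tabA_set]
    · -- i = 0, j > 0
      rw [if_neg (show ¬((i:Int) > 0) from by omega), if_pos (show (j:Int) > 0 from by omega)]
      rw [show ((i:Int) + (j:Int) - 1) = (((i+j-1:Nat)):Int) from by omega,
          show ((j:Int) - 1) = (((j-1:Nat)):Int) from by omega]
      simp only [PySem.List.pyGetD_natCast, PySem.Str.pyGet?_natCast, PySem.List.pySetD_natCast]
      rw [getRow_self a b c n m i j]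
      rw [rowP_get a b c m i j (j-1) _ (by omega)]
      rw [if_neg hip, if_pos hjp] at hbm
      simp only [mis, pyMinInf] at hbm
      simp only [pyMinInf]
      rw [← hbm, rowP_set a b c m i j hj, tabA_set]
    · exact absurd ⟨by omega, by omega⟩ h0

theorem rowA_fold (a b c : String) (n m i : Nat) (hi : i ≤ n) :
    ∀ d j, j + d = m + 1 →
      (PySem.List.pyRange (j:Int) ((m:Int)+1) 1).foldl (stepA a b c (i:Int)) (tabA a b c n m i j) =
        tabA a b c n m i (m+1) := by
  intro d
  induction d with
  | zero =>
      intro j hj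
      have hj' : j = m + 1 := by omega
      subst hj'
      rw [PySem.List.pyRange_one_eq_nil (by omega)]
      rfl
  | succ d ih =>
      intro j hj
      have hj' : j ≤ m := by omega
      rw [PySem.List.pyRange_one_cons (by omega)]
      rw [List.foldl_cons, stepA_tab a b c n m i j hi hj']
      have hc : ((j:Int)+1) = (((j+1:Nat)):Int) := by omega
      rw [hc, ih (j+1) (by omega)]

theorem tabA_succ (a b c : String) (n m i : Nat) (hi : i < n) :
    tabA a b c n m i (m+1) = tabA a b c n m (i+1) 0 := by
  have h1 : n - i = (n - (i+1)) + 1 := by omega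
  simp [tabA, List.range_succ, rowP, h1, List.replicate_succ]

theorem outerA_fold (a b c : String) (n m : Nat) :
    ∀ d i, i ≤ n → i + d = n →
      (PySem.List.pyRange (i:Int) ((n:Int)+1) 1).foldl (rowA a b c (m:Int)) (tabA a b c n m i 0) =
        tabA a b c n m n (m+1) := by
  intro d
  induction d with
  | zero =>
      intro i h1 h2
      have hi' : i = n := by omega
      rw [hi']
      rw [PySem.List.pyRange_one_cons (by omega)]
      rw [PySem.List.pyRange_one_eq_nil (by omega)]
      rw [List.foldl_cons, List.foldl_nil]
      unfold rowA
      have hf := rowA_fold a b c n m n (le_refl _) (m+1) 0 (by omega)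
      simp only [Nat.cast_zero] at hf
      exact hf
  | succ d ih =>
      intro i h1 h2
      rw [PySem.List.pyRange_one_cons (by omega)]
      rw [List.foldl_cons]
      have hstep : rowA a b c (m:Int) (tabA a b c n m i 0) (i:Int) = tabA a b c n m (i+1) 0 := by
        unfold rowA
        have hf := rowA_fold a b c n m i h1 (m+1) 0 (by omega)
        simp only [Nat.cast_zero] at hf
        rw [hf]
        exact tabA_succ a b c n m i (by omega)
      rw [hstep]
      have hc : ((i:Int)+1) = (((i+1:Nat)):Int) := by omega
      rw [hc]
      exact ih (i+1) (by omega) (by omega)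

theorem strLen_eq (s : String) : PySem.Str.len s = (s.toList.length : Int) := by
  simp [pysem]

theorem solveA_eq (a b c : String) :
    solve a b c = bestM a b c a.toList.length b.toList.length := by
  simp only [solve, strLen_eq]
  set n := a.toList.length with hn
  set m := b.toList.length with hm
  have hdp0 : (PySem.List.pyRange 0 ((n:Int)+1) 1).map (fun _ => List.replicate ((m:Int)+1).toNat (0:Int)) = tabA a b c n m 0 0 := by
    rw [List.map_const', PySem.List.length_pyRange_one]
    rw [show (((n:Int)+1) - 0).toNat = n + 1 from by omega,
        show ((m:Int)+1).toNat = m + 1 from by omega]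
    unfold tabA rowP
    simp [List.replicate_succ]
  rw [hdp0]
  have hfold := outerA_fold a b c n m n 0 (by omega) (by omega)
  simp only [Nat.cast_zero] at hfold
  rw [hfold]
  simp only [PySem.List.pyGetD_natCast]
  rw [getRow_self a b c n m n (m+1)]
  exact rowP_get a b c m n (m+1) m _ (by omega)

-- ---- B side: the rolling diagonal after B has processed diagonals ≤ s
def diagD (a b c : String) (n m s : Nat) : List Int :=
  (List.range (min n s + 1 - (s - m))).map (fun t => bestM a b c (s - m + t) (s - (s - m + t)))

theorem stepB_val (a b c : String) (n m s iN : Nat) (cur : List Int)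
    (hs1 : 1 ≤ s) (hs2 : s ≤ n + m) (hlo : s - m ≤ iN) (hhi : iN ≤ min n s) :
    stepB a b (PySem.Str.pyGet? c ((s:Int)-1)) (diagD a b c n m (s-1)) (s:Int)
        (max 0 ((s:Int)-1-(m:Int))) cur (iN:Int) =
      cur ++ [bestM a b c iN (s - iN)] := by
  have hin : iN ≤ n := le_trans hhi (min_le_left _ _)
  have his : iN ≤ s := le_trans hhi (min_le_right _ _)
  have hplo : max 0 ((s:Int)-1-(m:Int)) = (((s-1-m : Nat)) : Int) := by
    rw [max_def]; split_ifs <;> omega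
  unfold stepB
  rw [hplo]
  have hbm := bestM_eq a b c iN (s - iN) (by omega)
  have hcnt : ∀ t (d : Int), t < min n (s-1) + 1 - (s-1-m) →
      (diagD a b c n m (s-1)).getD t d = bestM a b c (s-1-m + t) ((s-1) - (s-1-m + t)) := by
    intro t d ht
    unfold diagD
    exact getD_map_range' _ _ _ _ ht
  by_cases hip : 0 < iN <;> by_cases hq : iN < s
  · rw [if_pos (show (iN:Int) > 0 from by omega), if_pos (show (iN:Int) < (s:Int) from by omega)]
    rw [show ((iN:Int) - 1 - ((s-1-m : Nat):Int)) = ((iN - 1 - (s-1-m) : Nat) : Int) from by omega,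
        show ((iN:Int) - ((s-1-m : Nat):Int)) = ((iN - (s-1-m) : Nat) : Int) from by omega,
        show ((iN:Int) - 1) = ((iN - 1 : Nat) : Int) from by omega,
        show ((s:Int) - (iN:Int) - 1) = ((s - iN - 1 : Nat) : Int) from by omega,
        show ((s:Int) - 1) = ((s - 1 : Nat) : Int) from by omega]
    simp only [PySem.List.pyGetD_natCast, PySem.Str.pyGet?_natCast]
    rw [hcnt _ _ (by omega), hcnt _ _ (by omega)]
    rw [show s-1-m + (iN - 1 - (s-1-m)) = iN - 1 from by omega,
        show s-1-m + (iN - (s-1-m)) = iN from by omega,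
        show (s-1) - (iN - 1) = s - iN from by omega,
        show s - 1 - iN = s - iN - 1 from by omega]
    rw [misNe, misNe]
    rw [if_pos hip, if_pos (show 0 < s - iN from by omega)] at hbm
    rw [show iN + (s - iN) - 1 = s - 1 from by omega] at hbm
    simp only [pyMinInf] at hbm
    rw [List.singleton_append, PySem.List.min?_id_cons]
    simp only [List.foldl_cons, List.foldl_nil, Option.getD_some]
    rw [hbm]
  · rw [if_pos (show (iN:Int) > 0 from by omega), if_neg (show ¬((iN:Int) < (s:Int)) from by omega)]
    rw [show ((iN:Int) - 1 - ((s-1-m : Nat):Int)) = ((iN - 1 - (s-1-m) : Nat) : Int) from by omega,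
        show ((iN:Int) - 1) = ((iN - 1 : Nat) : Int) from by omega,
        show ((s:Int) - 1) = ((s - 1 : Nat) : Int) from by omega]
    simp only [PySem.List.pyGetD_natCast, PySem.Str.pyGet?_natCast]
    rw [hcnt _ _ (by omega)]
    rw [show s-1-m + (iN - 1 - (s-1-m)) = iN - 1 from by omega,
        show (s-1) - (iN - 1) = s - iN from by omega]
    rw [misNe]
    rw [if_pos hip, if_neg (show ¬(0 < s - iN) from by omega)] at hbm
    rw [show iN + (s - iN) - 1 = iN - 1 from by omega] at hbm
    simp only [pyMinInf] at hbm
    rw [List.append_nil, PySem.List.min?_id_cons]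
    simp only [List.foldl_nil, Option.getD_some]
    rw [show (s:Nat) - 1 = iN - 1 from by omega]
    rw [hbm]
  · rw [if_neg (show ¬((iN:Int) > 0) from by omega), if_pos (show (iN:Int) < (s:Int) from by omega)]
    rw [show ((iN:Int) - ((s-1-m : Nat):Int)) = ((iN - (s-1-m) : Nat) : Int) from by omega,
        show ((s:Int) - (iN:Int) - 1) = ((s - iN - 1 : Nat) : Int) from by omega,
        show ((s:Int) - 1) = ((s - 1 : Nat) : Int) from by omega]
    simp only [PySem.List.pyGetD_natCast, PySem.Str.pyGet?_natCast]
    rw [hcnt _ _ (by omega)]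
    rw [show s-1-m + (iN - (s-1-m)) = iN from by omega,
        show (s-1) - iN = s - iN - 1 from by omega]
    rw [misNe]
    rw [if_neg (show ¬(0 < iN) from by omega), if_pos (show 0 < s - iN from by omega)] at hbm
    rw [show iN + (s - iN) - 1 = s - 1 from by omega] at hbm
    simp only [pyMinInf] at hbm
    rw [List.nil_append, PySem.List.min?_id_cons]
    simp only [List.foldl_nil, Option.getD_some]
    rw [hbm]
  · exact absurd hs1 (by omega)

theorem innerB_fold (a b c : String) (n m s : Nat) (hs1 : 1 ≤ s) (hs2 : s ≤ n + m) :
    ∀ d iN, s - m ≤ iN → iN + d = min n s + 1 → ∀ acc,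
      (PySem.List.pyRange (iN:Int) (((min n s : Nat):Int)+1) 1).foldl
        (stepB a b (PySem.Str.pyGet? c ((s:Int)-1)) (diagD a b c n m (s-1)) (s:Int)
          (max 0 ((s:Int)-1-(m:Int)))) acc =
      acc ++ (List.range d).map (fun t => bestM a b c (iN+t) (s - (iN+t))) := by
  intro d
  induction d with
  | zero =>
      intro iN h1 h2 acc
      rw [PySem.List.pyRange_one_eq_nil (by omega)]
      simp
  | succ d ih =>
      intro iN h1 h2 acc
      rw [PySem.List.pyRange_one_cons (by omega)]
      rw [List.foldl_cons, stepB_val a b c n m s iN acc hs1 hs2 h1 (by omega)]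
      rw [show ((iN:Int)+1) = (((iN+1:Nat)):Int) from by omega]
      rw [ih (iN+1) (by omega) (by omega)]
      rw [List.range_succ_eq_map, List.map_cons, List.map_map]
      simp only [Nat.add_zero, List.append_assoc, List.singleton_append]
      congr 2
      apply List.map_congr_left
      intro t ht
      simp only [Function.comp_apply]
      rw [show (iN+1)+t = iN + (t+1) from by omega]

theorem diagB_diag (a b c : String) (n m s : Nat) (hs1 : 1 ≤ s) (hs2 : s ≤ n + m) :
    diagB a b c (n:Int) (m:Int) (diagD a b c n m (s-1)) (s:Int) = diagD a b c n m s := by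
  simp only [diagB]
  have hlo : max 0 ((s:Int) - (m:Int)) = (((s-m : Nat)):Int) := by
    rw [max_def]; split_ifs <;> omega
  have hhi : min (n:Int) (s:Int) = ((min n s : Nat) : Int) := by rw [Nat.cast_min]
  rw [hlo, hhi]
  have hf := innerB_fold a b c n m s hs1 hs2 (min n s + 1 - (s-m)) (s-m) (le_refl _)
    (by have h1 : s - m ≤ min n s := le_min (by omega) (by omega); omega) []
  rw [hf]
  rw [List.nil_append]
  rfl

theorem outerB_fold (a b c : String) (n m : Nat) :
    ∀ d s, s ≤ n + m → s + d = n + m →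
      (PySem.List.pyRange ((s:Int)+1) ((n:Int)+(m:Int)+1) 1).foldl
        (diagB a b c (n:Int) (m:Int)) (diagD a b c n m s) = diagD a b c n m (n+m) := by
  intro d
  induction d with
  | zero =>
      intro s h1 h2
      rw [PySem.List.pyRange_one_eq_nil (by omega)]
      rw [List.foldl_nil]
      rw [show s = n + m from by omega]
  | succ d ih =>
      intro s h1 h2
      rw [PySem.List.pyRange_one_cons (by omega)]
      rw [List.foldl_cons]
      rw [show ((s:Int)+1) = (((s+1:Nat)):Int) from by omega]
      have hd := diagB_diag a b c n m (s+1) (by omega) (by omega)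
      rw [show s+1-1 = s from by omega] at hd
      rw [hd]
      exact ih (s+1) (by omega) (by omega)

theorem solveB_eq (a b c : String) :
    solve_alt a b c = bestM a b c a.toList.length b.toList.length := by
  simp only [solve_alt, strLen_eq]
  set n := a.toList.length with hn
  set m := b.toList.length with hm
  rw [show ([(0:Int)]) = diagD a b c n m 0 from by simp [diagD, bestM]]
  have hfold := outerB_fold a b c n m (n+m) 0 (by omega) (by omega)
  simp only [Nat.cast_zero, zero_add] at hfold
  rw [hfold]
  have hlast : diagD a b c n m (n+m) = [bestM a b c n m] := by
    unfold diagD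
    rw [show min n (n+m) = n from min_eq_left (Nat.le_add_right n m),
        show (n+m) - m = n from by omega,
        show n + 1 - n = 1 from by omega]
    simp [List.range_one, show (n+m) - n = m from by omega]
  rw [hlast]
  have hget := PySem.List.pyGetD_neg_one_append_singleton (xs := ([] : List Int))
    (x := bestM a b c n m) (d := (0:Int))
  rw [List.nil_append] at hget
  exact hget

-- ===== VERDICT (by name: the statement is the Claim_ definition above) =====
theorem solve_spec : Claim_equal_solve := by
  intro a b c _ _
  unfold Spec_solve
  rw [solveA_eq, solveB_eq]
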